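-- pv_equiv track=rewrite | github.com/tsameema/Python-Mini_Adventures | Project2_BirthdayParadox/birthday_paradox.py | match_birthdays
-- ===== SOURCE A (Python) =====
-- def match_birthdays(birthdays):
--   """
--   Checks if there are any matching birthdays in the given list.
--
--   Args:
--   birthdays (list): A list of birthdates to check for matches.
--
--   Returns:
--   int: Returns 1 if at least one pair of matching birthdays is found, -1 otherwise.
--   """
--   if len(birthdays) == len(set(birthdays)):
--     return -1
--   else:
--     is_birthdate_present = set()
--     for birth in birthdays:
--       if birth in is_birthdate_present:
--         return 1
--       is_birthdate_present.add(birth)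
-- ===== SOURCE B (Python) =====
-- def match_birthdays(birthdays):
--   """Sort a copy and scan adjacent pairs: 1 if any duplicate, else -1."""
--   s = sorted(birthdays)
--   for prev, cur in zip(s, s[1:]):
--     if prev == cur:
--       return 1
--   return -1
-- ===== Notes on version B (the rewrite author's own statement) =====
-- stated objective: alternative
-- what changed: Replaces the hash-set distinctness check plus set-membership scan with a sort of a copy followed by a single adjacent-pair scan.
import Mathlib
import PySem

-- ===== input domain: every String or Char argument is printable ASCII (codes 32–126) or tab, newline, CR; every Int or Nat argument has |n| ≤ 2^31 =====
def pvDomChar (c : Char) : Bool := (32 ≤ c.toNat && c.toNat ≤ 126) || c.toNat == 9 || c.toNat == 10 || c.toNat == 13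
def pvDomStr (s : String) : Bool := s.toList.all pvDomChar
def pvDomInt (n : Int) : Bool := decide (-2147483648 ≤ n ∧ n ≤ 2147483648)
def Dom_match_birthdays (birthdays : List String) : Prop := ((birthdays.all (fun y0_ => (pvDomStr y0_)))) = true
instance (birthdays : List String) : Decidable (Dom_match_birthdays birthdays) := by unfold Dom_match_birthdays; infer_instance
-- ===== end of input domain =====

-- B sorts a copy and scans adjacent pairs instead of A's hash-set distinctness check; alternative decomposition, return value proved equal.

-- ===== PORT A =====
-- the for-loop over birthdays with the running set is_birthdate_present
def pvLoopA : List String → PySem.Set String → Option Int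
  | [], _ => none
  | b :: rest, seen =>
    if PySem.Set.contains seen b then some 1
    else pvLoopA rest (PySem.Set.add seen b)

def match_birthdays (birthdays : List String) : Int :=
  if birthdays.length = (PySem.Set.ofList birthdays).length then -1
  else
    -- the Python loop's fall-through (return None) is unreachable here: a duplicate exists
    (pvLoopA birthdays PySem.Set.empty).getD 0

-- ===== PORT B =====
-- the for-loop over zip(s, s[1:]) of Source B
def pvScanAdj : List String → Int
  | a :: b :: rest => if a = b then 1 else pvScanAdj (b :: rest)
  | _ => -1

def match_birthdays_alt (birthdays : List String) : Int :=
  pvScanAdj (PySem.List.sorted birthdays (fun x => x) false)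

-- ===== PRECONDITION & SPEC =====
def Spec_match_birthdays (birthdays : List String) (out : Int) : Prop := out = match_birthdays_alt birthdays
instance (birthdays : List String) (out : Int) : Decidable (Spec_match_birthdays birthdays out) := by unfold Spec_match_birthdays; infer_instance

-- ===== CLAIM (what is proved, stated in full; the proofs are below) =====
def Claim_equal_match_birthdays : Prop := ∀ (birthdays : List String), Dom_match_birthdays birthdays → Spec_match_birthdays birthdays (match_birthdays birthdays)

-- ===== LEMMAS AND PROOFS =====

-- set(xs) has the same length as xs exactly when xs has no duplicates
theorem pv_len_ofList_iff (xs : List String) :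
    (PySem.Set.ofList xs).length = xs.length ↔ xs.Nodup := by
  have hperm : (PySem.Set.ofList xs).Perm xs.dedup := by
    rw [List.perm_ext_iff_of_nodup (PySem.Set.nodup_ofList xs) xs.nodup_dedup]
    intro y; simp [PySem.Set.mem_ofList, List.mem_dedup]
  rw [hperm.length_eq]
  constructor
  · intro h
    have := (xs.dedup_sublist).eq_of_length h
    exact List.dedup_eq_self.mp this
  · intro h; rw [List.dedup_eq_self.mpr h]

-- if A's loop falls through, the list was duplicate-free and disjoint from seen
theorem pv_loopA_none (xs : List String) (seen : PySem.Set String)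
    (h : pvLoopA xs seen = none) : xs.Nodup ∧ ∀ x ∈ xs, x ∉ seen := by
  induction xs generalizing seen with
  | nil => simp
  | cons b rest ih =>
    rw [pvLoopA] at h
    by_cases hc : PySem.Set.contains seen b = true
    · rw [if_pos hc] at h; exact absurd h (by simp)
    · have hm : b ∉ seen := fun hmem => hc ((PySem.Set.contains_iff seen b).mpr hmem)
      rw [if_neg hc] at h
      obtain ⟨hnd, hdisj⟩ := ih _ h
      have hb : ∀ x ∈ rest, x ∉ seen ∧ x ≠ b := by
        intro x hx
        have := hdisj x hx
        rw [PySem.Set.mem_add] at this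
        exact ⟨fun hm => this (Or.inl hm), fun he => this (Or.inr he)⟩
      refine ⟨List.nodup_cons.mpr ⟨fun hm => (hb b hm).2 rfl, hnd⟩, ?_⟩
      intro x hx
      rcases List.mem_cons.mp hx with rfl | hx
      · exact hm
      · exact (hb x hx).1

-- the adjacent scan on an ordered list decides Nodup
theorem pv_scanAdj_sorted : ∀ (s : List String), s.Pairwise (· ≤ ·) →
    pvScanAdj s = if s.Nodup then -1 else 1
  | [], _ => by simp [pvScanAdj]
  | [a], _ => by simp [pvScanAdj]
  | a :: b :: rest, hp => by
    by_cases hab : a = b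
    · subst hab
      simp [pvScanAdj, List.nodup_cons]
    · have hp' : (b :: rest).Pairwise (· ≤ ·) := hp.tail
      have hle := (List.pairwise_cons.mp hp).1
      have hble := (List.pairwise_cons.mp hp').1
      have hnotmem : a ∉ b :: rest := by
        intro hm
        rcases List.mem_cons.mp hm with rfl | hm
        · exact hab rfl
        · exact hab (le_antisymm (hle b List.mem_cons_self) (hble a hm))
      rw [pvScanAdj, if_neg hab, pv_scanAdj_sorted (b :: rest) hp']
      have hnd : (a :: b :: rest).Nodup ↔ (b :: rest).Nodup := by
        rw [List.nodup_cons]; exact ⟨fun h => h.2, fun h => ⟨hnotmem, h⟩⟩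
      simp [hnd]

-- ===== VERDICT (by name: the statement is the Claim_ definition above) =====
theorem match_birthdays_spec : Claim_equal_match_birthdays := by
  intro xs _
  unfold Spec_match_birthdays match_birthdays match_birthdays_alt
  have hperm := PySem.List.sorted_perm xs (fun x : String => x) false
  have hpair := PySem.List.sorted_pairwise xs (fun x : String => x)
  have hscan := pv_scanAdj_sorted _ hpair
  have hnd : (PySem.List.sorted xs (fun x => x) false).Nodup ↔ xs.Nodup := hperm.nodup_iff
  by_cases h : xs.Nodup
  · rw [if_pos (((pv_len_ofList_iff xs).mpr h).symm ▸ rfl)]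
    rw [hscan, if_pos (hnd.mpr h)]
  · rw [if_neg (fun he => h ((pv_len_ofList_iff xs).mp he.symm))]
    rw [hscan, if_neg (fun hs => h (hnd.mp hs))]
    rcases ho : pvLoopA xs PySem.Set.empty with _ | v
    · exact absurd (pv_loopA_none xs _ ho).1 h
    · -- loop can only return some 1
      have : ∀ ys seen v, pvLoopA ys seen = some v → v = 1 := by
        intro ys
        induction ys with
        | nil => intro seen v h; simp [pvLoopA] at h
        | cons b rest ih =>
          intro seen v h
          rw [pvLoopA] at h
          by_cases hc : PySem.Set.contains seen b = true
          · rw [if_pos hc] at h; exact (Option.some.inj h).symm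
          · rw [if_neg hc] at h
            exact ih _ _ h
      rw [this xs _ v ho]; rfl
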